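-- pv_equiv track=rewrite | github.com/chuci-qin/1024-multi-deep-research-agent-oracle | oracle/agents/strategies.py | get_recommended_profiles
-- ===== SOURCE A (Python) =====
-- from enum import Enum
--
-- class StrategyProfile(str, Enum):
--     """
--     Predefined strategy profiles for agent differentiation.
--
--     Task 2.6.1: Define strategy profiles.
--     """
--
--     # Core strategies
--     COMPREHENSIVE = "comprehensive"  # Broad coverage, all source types
--     FOCUSED_OFFICIAL = "focused_official"  # Focus on official/government sources
--     NEWS_CENTRIC = "news_centric"  # Focus on major news outlets
--     DIVERSE_PERSPECTIVES = "diverse_perspectives"  # Maximize viewpoint diversity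
--
--     # Verification strategies
--     SKEPTICAL = "skeptical"  # Look for counter-evidence
--     FACT_CHECK = "fact_check"  # Focus on fact-checking sources
--     CROSS_REFERENCE = "cross_reference"  # Verify across multiple sources
--
--     # Domain-specific
--     CRYPTO_FINANCIAL = "crypto_financial"  # Crypto and financial sources
--     SOCIAL_SENTIMENT = "social_sentiment"  # Social media analysis
--     ACADEMIC = "academic"  # Academic and research sources
--
-- def get_recommended_profiles(
--     agent_count: int = 5,
-- ) -> list[StrategyProfile]:
--     """
--     Get recommended strategy profiles for a set of agents.
--
--     Task 2.6.7: Recommend diverse profiles.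
--
--     Ensures diversity in research approaches.
--     """
--     if agent_count <= 0:
--         return []
--
--     # Recommended combination for maximum diversity
--     recommended = [
--         StrategyProfile.COMPREHENSIVE,  # Broad coverage
--         StrategyProfile.FOCUSED_OFFICIAL,  # Official sources
--         StrategyProfile.NEWS_CENTRIC,  # News coverage
--         StrategyProfile.SKEPTICAL,  # Counter-evidence
--         StrategyProfile.FACT_CHECK,  # Verification
--         StrategyProfile.DIVERSE_PERSPECTIVES,  # Multiple viewpoints
--         StrategyProfile.CROSS_REFERENCE,  # Cross-verification
--     ]
--
--     # Return requested number
--     if agent_count <= len(recommended):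
--         return recommended[:agent_count]
--
--     # If more agents needed, repeat with slight variation
--     result = recommended.copy()
--     while len(result) < agent_count:
--         # Add more agents with slightly different configs
--         result.extend(recommended[: agent_count - len(result)])
--
--     return result[:agent_count]
-- ===== SOURCE B (Python) =====
-- from enum import Enum
--
-- class StrategyProfile(str, Enum):
--     COMPREHENSIVE = "comprehensive"
--     FOCUSED_OFFICIAL = "focused_official"
--     NEWS_CENTRIC = "news_centric"
--     DIVERSE_PERSPECTIVES = "diverse_perspectives"
--     SKEPTICAL = "skeptical"
--     FACT_CHECK = "fact_check"
--     CROSS_REFERENCE = "cross_reference"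
--     CRYPTO_FINANCIAL = "crypto_financial"
--     SOCIAL_SENTIMENT = "social_sentiment"
--     ACADEMIC = "academic"
--
-- def get_recommended_profiles(agent_count=5):
--     recommended = [
--         StrategyProfile.COMPREHENSIVE,
--         StrategyProfile.FOCUSED_OFFICIAL,
--         StrategyProfile.NEWS_CENTRIC,
--         StrategyProfile.SKEPTICAL,
--         StrategyProfile.FACT_CHECK,
--         StrategyProfile.DIVERSE_PERSPECTIVES,
--         StrategyProfile.CROSS_REFERENCE,
--     ]
--     return [recommended[i % len(recommended)] for i in range(agent_count)]
-- ===== Notes on version B (the rewrite author's own statement) =====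
-- stated objective: simpler
-- what changed: Replaces A's three-way branching (early return, slice for small counts, copy + while-extend loop + final slice for large counts) with a single modular-index comprehension recommended[i % 7] over range(agent_count).
import Mathlib
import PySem

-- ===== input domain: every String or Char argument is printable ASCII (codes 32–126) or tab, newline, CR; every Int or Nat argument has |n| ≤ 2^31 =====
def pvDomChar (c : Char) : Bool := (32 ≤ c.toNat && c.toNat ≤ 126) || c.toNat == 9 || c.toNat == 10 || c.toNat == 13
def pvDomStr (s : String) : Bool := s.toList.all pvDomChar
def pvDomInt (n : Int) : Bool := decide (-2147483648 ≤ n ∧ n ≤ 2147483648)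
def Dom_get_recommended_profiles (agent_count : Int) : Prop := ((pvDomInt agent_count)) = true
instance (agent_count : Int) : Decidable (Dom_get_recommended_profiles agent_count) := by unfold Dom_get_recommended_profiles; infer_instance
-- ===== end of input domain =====

-- B replaces A's slice/copy/while-extend branching by a single modular-index
-- comprehension over range(agent_count); objective: simpler.


-- ===== PORT A =====
-- the `recommended` list (StrategyProfile members are str-valued; ported as their values)
def pvRecommended : List String :=
  ["comprehensive", "focused_official", "news_centric", "skeptical",
   "fact_check", "diverse_perspectives", "cross_reference"]

-- the `while len(result) < agent_count: result.extend(recommended[:agent_count - len(result)])` loop;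
-- `recommended[:m]` with m > 0 (always the case inside the loop) is exactly `take m.toNat`
def pvLoopA (agent_count : Int) (result : List String) : List String :=
  if _h : (result.length : Int) < agent_count then
    pvLoopA agent_count (result ++ pvRecommended.take (agent_count - result.length).toNat)
  else result
termination_by (agent_count - result.length).toNat
decreasing_by
  simp only [List.length_append, List.length_take]
  simp only [pvRecommended, List.length]
  omega

def get_recommended_profiles (agent_count : Int) : List String :=
  if agent_count ≤ 0 then []
  else if agent_count ≤ (pvRecommended.length : Int) then
    -- recommended[:agent_count], agent_count > 0 here
    pvRecommended.take agent_count.toNat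
  else
    -- result = recommended.copy(); while-loop; return result[:agent_count]
    (pvLoopA agent_count pvRecommended).take agent_count.toNat

-- ===== PORT B =====
def get_recommended_profiles_alt (agent_count : Int) : List String :=
  (List.range agent_count.toNat).map
    (fun i => pvRecommended.getD (i % pvRecommended.length) "")

-- ===== PRECONDITION & SPEC =====
def Spec_get_recommended_profiles (agent_count : Int) (out : List String) : Prop := out = get_recommended_profiles_alt agent_count
instance (agent_count : Int) (out : List String) : Decidable (Spec_get_recommended_profiles agent_count out) := by unfold Spec_get_recommended_profiles; infer_instance

-- ===== CLAIM (what is proved, stated in full; the proofs are below) =====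
def Claim_equal_get_recommended_profiles : Prop := ∀ (agent_count : Int), Dom_get_recommended_profiles agent_count → Spec_get_recommended_profiles agent_count (get_recommended_profiles agent_count)

-- ===== LEMMAS AND PROOFS =====

-- the cyclic prefix B computes
def pvCyc (n : Nat) : List String :=
  (List.range n).map (fun i => pvRecommended.getD (i % pvRecommended.length) "")

theorem pvCyc_length (n : Nat) : (pvCyc n).length = n := by
  simp [pvCyc]

theorem pvRec_length : pvRecommended.length = 7 := by rfl

-- appending a ≤7-prefix of `recommended` at a multiple-of-7 position extends the cycle
theorem pvCyc_append (k m : Nat) (h7 : 7 ∣ k) (hm : m ≤ 7) :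
    pvCyc k ++ pvRecommended.take m = pvCyc (k + m) := by
  apply List.ext_getElem
  · simp [pvCyc, pvRec_length]; omega
  · intro i h1 h2
    have hlA : (pvCyc k).length = k := pvCyc_length k
    have hi : i < k + m := by simpa [pvCyc_length] using h2
    rcases Nat.lt_or_ge i k with hik | hik
    · rw [List.getElem_append_left (by rw [hlA]; exact hik)]
      simp only [pvCyc, List.getElem_map, List.getElem_range]
    · rw [List.getElem_append_right (by rw [hlA]; exact hik)]
      simp only [pvCyc, List.getElem_map, List.getElem_range, List.getElem_take]
      have hlt : i - k < 7 := by omega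
      have hmod : i % pvRecommended.length = i - k := by rw [pvRec_length]; omega
      rw [List.getD_eq_getElem _ _ (by rw [hmod, pvRec_length]; omega)]
      simp only [List.length_map, List.length_range]
      simp [hmod.symm]

theorem pvLoopA_cyc (agent_count : Int) (k : Nat) (h7 : 7 ∣ k) (hk : 0 < k) :
    pvLoopA agent_count (pvCyc k) = pvCyc (max k agent_count.toNat) := by
  rw [pvLoopA]
  rw [pvCyc_length]
  split_ifs with h
  · -- k < agent_count: one extend step
    have hk' : (k : Int) < agent_count := h
    have hm1 : 1 ≤ (agent_count - (k : Int)).toNat := by omega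
    have htake : pvRecommended.take (agent_count - (k : Int)).toNat
        = pvRecommended.take (min (agent_count - (k : Int)).toNat 7) := by
      rcases Nat.le_total (agent_count - (k : Int)).toNat 7 with h' | h'
      · rw [Nat.min_eq_left h']
      · rw [Nat.min_eq_right h', List.take_of_length_le (by rw [pvRec_length]; omega)]
        rfl
    rw [htake, pvCyc_append k _ h7 (Nat.min_le_right _ _)]
    rcases Nat.le_total 7 (agent_count - (k : Int)).toNat with h' | h'
    · -- full block of 7 appended; recurse
      rw [Nat.min_eq_right h']
      rw [pvLoopA_cyc agent_count (k + 7) (by omega) (by omega)]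
      congr 1
      omega
    · -- partial block: length reaches agent_count exactly, loop exits
      rw [Nat.min_eq_left h']
      rw [pvLoopA, pvCyc_length]
      rw [dif_neg (by push_cast; omega)]
      congr 1
      omega
  · -- loop does not run
    congr 1
    omega
termination_by (agent_count - k).toNat
decreasing_by omega

theorem pvCyc_take (n j : Nat) : (pvCyc n).take j = pvCyc (min j n) := by
  rw [pvCyc, ← List.map_take, List.take_range]; rfl

theorem pvRec_eq_cyc : pvRecommended = pvCyc 7 := by rfl

theorem pvTake_eq_cyc (j : Nat) (hj : j ≤ 7) : pvRecommended.take j = pvCyc j := by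
  have := pvCyc_append 0 j (by omega) hj
  simpa [pvCyc] using this

-- ===== VERDICT (by name: the statement is the Claim_ definition above) =====
theorem get_recommended_profiles_spec : Claim_equal_get_recommended_profiles := by
  intro n _
  show get_recommended_profiles n = get_recommended_profiles_alt n
  have halt : get_recommended_profiles_alt n = pvCyc n.toNat := rfl
  rw [halt, get_recommended_profiles]
  split_ifs with h1 h2
  · have : n.toNat = 0 := by omega
    rw [this]; rfl
  · rw [pvTake_eq_cyc n.toNat (by rw [pvRec_length] at h2; omega)]
  · rw [pvRec_eq_cyc, pvLoopA_cyc n 7 (by omega) (by omega), pvCyc_take]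
    congr 1
    rw [pvRec_length] at h2
    omega
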